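-- pv_equiv track=rewrite | github.com/PittYHL/Elastic_MBQC | last_step.py | sort_shape
-- ===== SOURCE A (Python) =====
-- import copy
--
-- maximum = 5
--
-- def sort_shape(shapes, old_indexes):
--     indexes = []
--     if len(shapes) <= maximum:
--         for i in range(len(shapes)):
--             indexes.append(old_indexes[i])
--         return shapes, indexes
--     else:
--         temp_shapes = copy.deepcopy(shapes)
--         spaces = []
--         shortest_shape = []
--         for shape in shapes:
--             space = check_space(shape)
--             spaces.append(space)
--         temp_spaces = copy.deepcopy(spaces)
--         temp_spaces.sort(reverse=True)
--         while len(shortest_shape) != maximum: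
--             depth = temp_spaces.pop(0)
--             index = spaces.index(depth)
--             spaces.pop(index)
--             shape = temp_shapes.pop(index)
--             indexes.append(old_indexes[shapes.index(shape)])
--             shortest_shape.append(shape)
--         return shortest_shape, indexes
--
-- def check_space(shape):
--     space = 0
--     for row in shape:
--         for j in range(len(row)):
--             if row[j] != 0:
--                 space = space + j
--                 break
--         for j in reversed(range(len(row))):
--             if row[j] != 0:
--                 space = space + len(row) - j - 1
--                 break
--     return space
-- ===== SOURCE B (Python) =====
-- import copy
--
-- maximum = 5
--
-- def row_margin(row):
--     nz = [j for j, v in enumerate(row) if v != 0]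
--     if not nz:
--         return 0
--     return nz[0] + len(row) - 1 - nz[-1]
--
-- def sort_shape(shapes, old_indexes):
--     n = len(shapes)
--     if n <= maximum:
--         return shapes, list(old_indexes[:n])
--     spaces = [sum(row_margin(r) for r in s) for s in shapes]
--     order = sorted(range(n), key=lambda i: (-spaces[i], i))[:maximum]
--     return [copy.deepcopy(shapes[i]) for i in order], [old_indexes[i] for i in order]
-- ===== Notes on version B (the rewrite author's own statement) =====
-- stated objective: alternative
-- what changed: A deep-copies the whole list twice, sorts the space values and then selects 5 winners by a pop-loop with repeated list.index scans; B computes an index argsort once (stable sort of range(n) by (-space, i)), slices the top 5, and deep-copies only the 5 kept shapes.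
import Mathlib
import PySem

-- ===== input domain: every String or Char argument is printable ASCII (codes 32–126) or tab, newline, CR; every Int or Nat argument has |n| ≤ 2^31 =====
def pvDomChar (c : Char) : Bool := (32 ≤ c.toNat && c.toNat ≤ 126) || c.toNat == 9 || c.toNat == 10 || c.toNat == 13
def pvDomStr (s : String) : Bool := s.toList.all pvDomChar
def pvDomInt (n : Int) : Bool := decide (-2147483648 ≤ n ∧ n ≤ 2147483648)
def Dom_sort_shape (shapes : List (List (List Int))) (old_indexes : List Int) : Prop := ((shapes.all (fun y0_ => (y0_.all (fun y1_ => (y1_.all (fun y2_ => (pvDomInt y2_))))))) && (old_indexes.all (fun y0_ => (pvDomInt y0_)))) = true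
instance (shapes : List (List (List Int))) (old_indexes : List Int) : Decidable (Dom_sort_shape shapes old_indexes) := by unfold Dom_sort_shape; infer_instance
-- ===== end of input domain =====

-- B replaces A's deepcopy+sort-values+repeated-index/pop selection by one stable index sort
-- (key (-space, position)) and a slice; equivalence of RETURN VALUES only (A deep-copies, B copies only the 5 kept shapes).

-- ===== PORT A =====
-- 'for j in range(len(row)): if row[j] != 0: space += j; break'
def pvScan1 (row : List Int) (js : List Int) (space : Int) : Int :=
  match js with
  | [] => space
  | j :: rest => if PySem.List.pyGetD row j 0 ≠ 0 then space + j else pvScan1 row rest space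

-- 'for j in reversed(range(len(row))): if row[j] != 0: space += len(row) - j - 1; break'
def pvScan2 (row : List Int) (js : List Int) (space : Int) : Int :=
  match js with
  | [] => space
  | j :: rest =>
    if PySem.List.pyGetD row j 0 ≠ 0 then space + PySem.List.len row - j - 1
    else pvScan2 row rest space

def pvCheckSpace (shape : List (List Int)) : Int :=
  shape.foldl (fun space row =>
    pvScan2 row (PySem.List.pyRange 0 (PySem.List.len row) 1).reverse
      (pvScan1 row (PySem.List.pyRange 0 (PySem.List.len row) 1) space)) 0

-- the 'while len(shortest_shape) != maximum' loop; fuel 5 = maximum iterations; the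
-- 'none'/[] fallthrough branches are where Python would raise (unreachable under Pre_)
def pvLoopA (shapes : List (List (List Int))) (old_indexes : List Int) :
    Nat → List Int → List Int → List (List (List Int)) → List (List (List Int)) → List Int →
    List (List (List Int)) × List Int
  | 0, _, _, _, shortest, indexes => (shortest, indexes)
  | fuel+1, temp_spaces, spaces, temp_shapes, shortest, indexes =>
    if shortest.length = 5 then (shortest, indexes) else
    match temp_spaces with
    | [] => (shortest, indexes)
    | depth :: rest =>
      match PySem.List.index? spaces depth with
      | none => (shortest, indexes)
      | some idx =>
        let spaces' := spaces.eraseIdx idx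
        match PySem.List.pop? temp_shapes (idx : Int) with
        | none => (shortest, indexes)
        | some (shape, temp_shapes') =>
          let newIdx := match PySem.List.index? shapes shape with
                        | none => 0
                        | some k => PySem.List.pyGetD old_indexes (k : Int) 0
          pvLoopA shapes old_indexes fuel rest spaces' temp_shapes'
            (shortest ++ [shape]) (indexes ++ [newIdx])

def sort_shape (shapes : List (List (List Int))) (old_indexes : List Int) :
    List (List (List Int)) × List Int :=
  if PySem.List.len shapes ≤ 5 then
    (shapes, (PySem.List.pyRange 0 (PySem.List.len shapes) 1).foldl
      (fun acc i => acc ++ [PySem.List.pyGetD old_indexes i 0]) [])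
  else
    let temp_shapes := shapes
    let spaces := shapes.foldl (fun acc s => acc ++ [pvCheckSpace s]) []
    let temp_spaces := PySem.List.sorted spaces (fun x => x) true
    pvLoopA shapes old_indexes 5 temp_spaces spaces temp_shapes [] []

-- ===== PORT B =====
def pvRowMargin (row : List Int) : Int :=
  let nz := ((PySem.List.enumerate row 0).filter (fun p => p.2 != 0)).map (fun p => p.1)
  match nz with
  | [] => 0
  | j :: rest => j + PySem.List.len row - 1 - (j :: rest).getLast (by simp)

def sort_shape_alt (shapes : List (List (List Int))) (old_indexes : List Int) :
    List (List (List Int)) × List Int :=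
  let n := PySem.List.len shapes
  if n ≤ 5 then
    (shapes, PySem.List.slice old_indexes none (some n))
  else
    let spaces := shapes.map (fun s => (s.map pvRowMargin).sum)
    let order := (PySem.List.sorted (PySem.List.pyRange 0 n 1)
        (fun i => toLex (-(PySem.List.pyGetD spaces i 0), i)) false).take 5
    (order.map (fun i => PySem.List.pyGetD shapes i []),
     order.map (fun i => PySem.List.pyGetD old_indexes i 0))

-- ===== PRECONDITION & SPEC =====
-- Pre_ excludes (a) old_indexes shorter than shapes — there A raises IndexError on every
-- input with at most 5 shapes and on most larger ones — and (b) more than 5 shapes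
-- containing two equal shapes, where the index A reports for a selected duplicate is the
-- accidental shapes.index first-occurrence match rather than the selected position.
def Pre_sort_shape (shapes : List (List (List Int))) (old_indexes : List Int) : Prop :=
  shapes.length ≤ old_indexes.length ∧ (shapes.length ≤ 5 ∨ shapes.Nodup)
instance (shapes : List (List (List Int))) (old_indexes : List Int) :
    Decidable (Pre_sort_shape shapes old_indexes) := by unfold Pre_sort_shape; infer_instance

def pvWitness_sort_shape : List (List (List Int)) × List Int :=
  ([[[1]], [[2]], [[3]], [[4]], [[5]], [[0, 6]]], [10, 20, 30, 40, 50, 60])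

def Spec_sort_shape (shapes : List (List (List Int))) (old_indexes : List Int)
    (out : List (List (List Int)) × List Int) : Prop := out = sort_shape_alt shapes old_indexes
instance (shapes : List (List (List Int))) (old_indexes : List Int)
    (out : List (List (List Int)) × List Int) : Decidable (Spec_sort_shape shapes old_indexes out) := by
  unfold Spec_sort_shape; infer_instance

-- ===== CLAIM (what is proved, stated in full; the proofs are below) =====
def Claim_equal_sort_shape : Prop := ∀ (shapes : List (List (List Int))) (old_indexes : List Int), Dom_sort_shape shapes old_indexes → Pre_sort_shape shapes old_indexes → Spec_sort_shape shapes old_indexes (sort_shape shapes old_indexes)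
-- ===== LEMMAS AND PROOFS =====

def pvFnz : List Int → Option Nat
  | [] => none
  | x :: xs => if x ≠ 0 then some 0 else (pvFnz xs).map (· + 1)

theorem pvE_cons (x : Int) (xs : List Int) (a : Int) :
    ((PySem.List.enumerate (x :: xs) a).filter (fun p => p.2 != 0)).map (fun p => p.1)
      = (if x ≠ 0 then [a] else [])
        ++ ((PySem.List.enumerate xs (a + 1)).filter (fun p => p.2 != 0)).map (fun p => p.1) := by
  have h : PySem.List.enumerate (x :: xs) a = (a, x) :: PySem.List.enumerate xs (a + 1) := by
    have := PySem.List.enumerate_append [x] xs a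
    simpa using this
  rw [h]
  by_cases hx : x = 0 <;>
    simp [hx, List.filter_cons, show ((0:Int) != 0) = false by decide]

theorem pvE_head (row : List Int) (a : Int) :
    (((PySem.List.enumerate row a).filter (fun p => p.2 != 0)).map (fun p => p.1)).head?
      = (pvFnz row).map (fun j => a + (j : Int)) := by
  induction row generalizing a with
  | nil => simp [PySem.List.enumerate, pvFnz]
  | cons x xs ih =>
    rw [pvE_cons]
    by_cases hx : x = 0
    · rw [if_neg (by simp [hx]), List.nil_append, ih]
      simp only [pvFnz, hx]
      rw [if_neg (by simp)]
      cases pvFnz xs <;> simp <;> ring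
    · simp [pvFnz, hx]

theorem pvE_getLast (row : List Int) (a : Int) :
    (((PySem.List.enumerate row a).filter (fun p => p.2 != 0)).map (fun p => p.1)).getLast?
      = (pvFnz row.reverse).map (fun k => a + (row.length : Int) - 1 - (k : Int)) := by
  induction row using List.reverseRecOn generalizing a with
  | nil => simp [PySem.List.enumerate, pvFnz]
  | append_singleton xs x ih =>
    rw [PySem.List.enumerate_append, List.filter_append, List.map_append]
    by_cases hx : x = 0
    · have he : ((PySem.List.enumerate [x] (a + ↑xs.length)).filter (fun p => p.2 != 0)).map
          (fun p : Int × Int => p.1) = [] := by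
        simp [PySem.List.enumerate, List.filter, hx]
      rw [he, List.append_nil, ih]
      simp only [List.reverse_append, List.reverse_singleton, List.singleton_append, pvFnz, hx]
      rw [if_neg (by simp)]
      cases pvFnz xs.reverse <;> simp <;> push_cast <;> ring
    · have he : ((PySem.List.enumerate [x] (a + ↑xs.length)).filter (fun p => p.2 != 0)).map
          (fun p : Int × Int => p.1) = [a + ↑xs.length] := by
        simp [PySem.List.enumerate, List.filter, hx]
      rw [he, List.getLast?_append]
      simp only [List.reverse_append, List.reverse_singleton, List.singleton_append, pvFnz]
      rw [if_pos (by simp [hx])]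
      simp
      push_cast
      ring

theorem pvFnz_none (row : List Int) : pvFnz row = none ↔ ∀ x ∈ row, x = 0 := by
  induction row with
  | nil => simp [pvFnz]
  | cons x xs ih =>
    by_cases hx : x = 0 <;> simp [pvFnz, hx, ih]

theorem pvScan1_eq (row : List Int) (sp : Int) :
    ∀ (m : Nat) (a : Int), 0 ≤ a → (row.length : Int) - a = (m : Int) →
    pvScan1 row (PySem.List.pyRange a (PySem.List.len row) 1) sp
      = match pvFnz (row.drop a.toNat) with
        | none => sp
        | some j => sp + a + (j : Int) := by
  intro m
  induction m with
  | zero =>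
    intro a h0 hm
    rw [PySem.List.len_eq, PySem.List.pyRange_one_eq_nil (by omega)]
    have : row.drop a.toNat = [] := List.drop_eq_nil_of_le (by omega)
    simp [pvScan1, this, pvFnz]
  | succ m ih =>
    intro a h0 hm
    have ha : a < (row.length : Int) := by omega
    rw [PySem.List.len_eq, PySem.List.pyRange_one_cons (by omega)]
    have hlt : a.toNat < row.length := by omega
    have hget : PySem.List.pyGetD row a 0 = row[a.toNat] :=
      PySem.List.pyGetD_eq_getElem row 0 h0 ha
    have hdrop : row.drop a.toNat = row[a.toNat] :: row.drop (a.toNat + 1) :=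
      List.drop_eq_getElem_cons hlt
    simp only [pvScan1, hget]
    by_cases hx : row[a.toNat] = 0
    · rw [if_neg (by simp [hx])]
      have := ih (a + 1) (by omega) (by push_cast; omega)
      rw [PySem.List.len_eq] at this
      rw [this, hdrop]
      simp only [pvFnz, hx]
      rw [if_neg (by simp)]
      have : (a + 1).toNat = a.toNat + 1 := by omega
      rw [this]
      cases pvFnz (row.drop (a.toNat + 1)) <;> simp <;> ring
    · rw [if_pos (by simp [hx]), hdrop]
      simp [pvFnz, hx]

theorem pvScan2_eq (row : List Int) :
    ∀ (m : Nat) (sp b : Int), 0 ≤ b → b = (m : Int) → b ≤ (row.length : Int) →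
    pvScan2 row (PySem.List.pyRange 0 b 1).reverse sp
      = match pvFnz (row.take b.toNat).reverse with
        | none => sp
        | some k => sp + ((row.length : Int) - b) + (k : Int) := by
  intro m
  induction m with
  | zero =>
    intro sp b h0 hm _
    rw [PySem.List.pyRange_one_eq_nil (by omega)]
    have : b.toNat = 0 := by omega
    simp [pvScan2, this, pvFnz]
  | succ m ih =>
    intro sp b h0 hm hble
    have hb1 : b - 1 + 1 = b := by ring
    have hsplit := PySem.List.pyRange_one_succ_right (a := 0) (b := b - 1) (by omega)
    rw [hb1] at hsplit
    rw [hsplit, List.reverse_append]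
    have hlt : (b - 1).toNat < row.length := by omega
    have hget : PySem.List.pyGetD row (b - 1) 0 = row[(b-1).toNat] :=
      PySem.List.pyGetD_eq_getElem row 0 (by omega) (by omega)
    have htake : row.take b.toNat = row.take (b-1).toNat ++ [PySem.List.pyGetD row (b - 1) 0] := by
      rw [hget]
      have : b.toNat = (b-1).toNat + 1 := by omega
      rw [this, List.take_add_one, List.getElem?_eq_getElem hlt]
      rfl
    simp only [List.reverse_singleton, List.singleton_append, pvScan2]
    by_cases hx : PySem.List.pyGetD row (b - 1) 0 = 0
    · rw [if_neg (by simp [hx])]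
      have := ih sp (b - 1) (by omega) (by push_cast; omega) (by omega)
      rw [this, htake]
      simp only [List.reverse_append, List.reverse_singleton, List.singleton_append, pvFnz, hx]
      rw [if_neg (by simp)]
      cases pvFnz (row.take (b-1).toNat).reverse <;> simp <;> ring
    · rw [if_pos (by simp [hx]), htake]
      simp only [List.reverse_append, List.reverse_singleton, List.singleton_append, pvFnz]
      rw [if_pos (by simp [hx])]
      simp [PySem.List.len_eq]
      ring

theorem pvFnz_rev_none (row : List Int) : pvFnz row.reverse = none ↔ pvFnz row = none := by
  rw [pvFnz_none, pvFnz_none]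
  constructor <;> intro h x hx
  · exact h x (List.mem_reverse.mpr hx)
  · exact h x (List.mem_reverse.mp hx)

theorem pvRowMargin_eq (row : List Int) :
    pvRowMargin row = match pvFnz row, pvFnz row.reverse with
      | some j, some k => (j : Int) + (k : Int)
      | _, _ => 0 := by
  have hh := pvE_head row 0
  have hl := pvE_getLast row 0
  unfold pvRowMargin
  cases hnz : ((PySem.List.enumerate row 0).filter (fun p => p.2 != 0)).map (fun p => p.1) with
  | nil =>
    rw [hnz] at hh
    simp at hh
    have hfn : pvFnz row = none := by
      cases h : pvFnz row with
      | none => rfl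
      | some j => rw [h] at hh; simp at hh
    have h2 : pvFnz row.reverse = none := (pvFnz_rev_none row).mpr hfn
    simp [hfn, h2]
  | cons j rest =>
    rw [hnz] at hh hl
    simp only [List.head?_cons] at hh
    cases hf : pvFnz row with
    | none => rw [hf] at hh; simp at hh
    | some j0 =>
      rw [hf] at hh
      simp at hh
      cases hg : pvFnz row.reverse with
      | none =>
        have := (pvFnz_rev_none row).mp hg
        rw [this] at hf; cases hf
      | some k0 =>
        rw [hg] at hl
        have hlast : (j :: rest).getLast (by simp) = 0 + (row.length : Int) - 1 - (k0 : Int) := by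
          have := List.getLast?_eq_getLast (l := j :: rest) (by simp)
          rw [this] at hl
          simpa using hl
        simp only [hlast, ← hh, PySem.List.len_eq]
        push_cast
        ring

theorem pvStep (row : List Int) (sp : Int) :
    pvScan2 row (PySem.List.pyRange 0 (PySem.List.len row) 1).reverse
      (pvScan1 row (PySem.List.pyRange 0 (PySem.List.len row) 1) sp)
      = sp + pvRowMargin row := by
  have h1 := pvScan1_eq row sp row.length 0 le_rfl (by simp)
  have h2 := pvScan2_eq row row.length
    (pvScan1 row (PySem.List.pyRange 0 (PySem.List.len row) 1) sp) (row.length : Int)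
    (by positivity) rfl le_rfl
  rw [PySem.List.len_eq] at h1 h2 ⊢
  have htake : row.take ((row.length : Int)).toNat = row := by simp
  rw [htake] at h2
  rw [h2, h1, pvRowMargin_eq]
  cases hf : pvFnz row with
  | none =>
    have hg : pvFnz row.reverse = none := (pvFnz_rev_none row).mpr hf
    have : row.drop ((0:Int)).toNat = row := by simp
    rw [this, hf, hg]
    simp
  | some j0 =>
    have : row.drop ((0:Int)).toNat = row := by simp
    rw [this, hf]
    cases hg : pvFnz row.reverse with
    | none => rw [(pvFnz_rev_none row).mp hg] at hf; cases hf
    | some k0 => simp; ring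

theorem pvCheckSpace_eq (s : List (List Int)) : pvCheckSpace s = (s.map pvRowMargin).sum := by
  unfold pvCheckSpace
  simp only [pvStep]
  rw [PySem.List.foldl_add s pvRowMargin 0]
  simp

def pvFirstMax (f : Int → Int) : List Int → Option (Int × List Int)
  | [] => none
  | r :: rest =>
    match pvFirstMax f rest with
    | none => some (r, [])
    | some (r', rest') => if f r < f r' then some (r', r :: rest') else some (r, rest)

def pvSel (f : Int → Int) : Nat → List Int → List Int
  | 0, _ => []
  | k+1, R =>
    match pvFirstMax f R with
    | none => []
    | some (r, R') => r :: pvSel f k R'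

theorem pvFirstMax_none (f : Int → Int) (R : List Int) : pvFirstMax f R = none ↔ R = [] := by
  cases R with
  | nil => simp [pvFirstMax]
  | cons r rest =>
    simp only [pvFirstMax]
    cases h : pvFirstMax f rest with
    | none => simp
    | some p => cases p with | mk r' rest' => simp only; split <;> simp

theorem pvFirstMax_spec (f : Int → Int) (R : List Int) (r : Int) (R' : List Int)
    (h : pvFirstMax f R = some (r, R')) :
    ∃ pre suf, R = pre ++ r :: suf ∧ R' = pre ++ suf ∧
      (∀ x ∈ pre, f x < f r) ∧ (∀ x ∈ suf, f x ≤ f r) := by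
  induction R generalizing r R' with
  | nil => simp [pvFirstMax] at h
  | cons a rest ih =>
    simp only [pvFirstMax] at h
    cases hm : pvFirstMax f rest with
    | none =>
      rw [hm] at h
      simp at h
      obtain ⟨rfl, rfl⟩ := h
      exact ⟨[], [], by simp [(pvFirstMax_none f rest).mp hm]⟩
    | some p =>
      obtain ⟨r', rest'⟩ := p
      rw [hm] at h
      simp only at h
      by_cases hlt : f a < f r'
      · rw [if_pos hlt] at h
        simp at h
        obtain ⟨rfl, rfl⟩ := h
        obtain ⟨pre, suf, h1, h2, h3, h4⟩ := ih r' rest' hm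
        exact ⟨a :: pre, suf, by simp [h1], by simp [h2],
          by intro x hx; rcases List.mem_cons.mp hx with rfl | hx; exact hlt; exact h3 x hx, h4⟩
      · rw [if_neg hlt] at h
        simp at h
        obtain ⟨rfl, rfl⟩ := h
        obtain ⟨pre, suf, h1, h2, h3, h4⟩ := ih r' rest' hm
        refine ⟨[], rest, by simp, by simp, by simp, ?_⟩
        intro x hx
        rw [h1] at hx
        push Not at hlt
        rcases List.mem_append.mp hx with hx | hx
        · exact le_trans (le_of_lt (h3 x hx)) hlt
        · rcases List.mem_cons.mp hx with rfl | hx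
          · exact hlt
          · exact le_trans (h4 x hx) hlt

theorem pvSel_perm (f : Int → Int) (R : List Int) : (pvSel f R.length R).Perm R := by
  induction hn : R.length generalizing R with
  | zero => simp_all [List.length_eq_zero_iff.mp hn, pvSel]
  | succ n ih =>
    cases hm : pvFirstMax f R with
    | none => simp [(pvFirstMax_none f R).mp hm] at hn
    | some p =>
      obtain ⟨r, R'⟩ := p
      obtain ⟨pre, suf, h1, h2, -, -⟩ := pvFirstMax_spec f R r R' hm
      have hlen : R'.length = n := by
        subst h1 h2; simp at hn ⊢; omega
      simp only [pvSel, hm]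
      have hp : (r :: pvSel f n R').Perm (r :: (pre ++ suf)) := by
        rw [← h2]; exact (ih R' hlen).cons r
      rw [h1]
      exact hp.trans List.perm_middle.symm

theorem pvSel_take (f : Int → Int) (k k' : Nat) (R : List Int) (h : k ≤ k') :
    (pvSel f k' R).take k = pvSel f k R := by
  induction k' generalizing k R with
  | zero => interval_cases k; simp [pvSel]
  | succ n ih =>
    cases k with
    | zero => simp [pvSel]
    | succ m =>
      simp only [pvSel]
      cases hm : pvFirstMax f R with
      | none => simp
      | some p => obtain ⟨r, R'⟩ := p; simp [ih m R' (by omega)]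

theorem pvSel_pairwise (f : Int → Int) (R : List Int) (hR : R.Pairwise (· < ·)) :
    (pvSel f R.length R).Pairwise
      (fun a b => (toLex (-(f a), a) : Lex (Int × Int)) < toLex (-(f b), b)) := by
  induction hn : R.length generalizing R with
  | zero => simp_all [List.length_eq_zero_iff.mp hn, pvSel]
  | succ n ih =>
    cases hm : pvFirstMax f R with
    | none => simp [(pvFirstMax_none f R).mp hm] at hn
    | some p =>
      obtain ⟨r, R'⟩ := p
      obtain ⟨pre, suf, h1, h2, h3, h4⟩ := pvFirstMax_spec f R r R' hm
      have hlen : R'.length = n := by subst h1 h2; simp at hn ⊢; omega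
      have hR' : R'.Pairwise (· < ·) := by
        rw [h2]
        refine hR.sublist ?_
        rw [h1]
        exact (List.sublist_cons_self r suf).append_left pre
      simp only [pvSel, hm]
      rw [List.pairwise_cons]
      constructor
      · intro b hb
        have hbR' : b ∈ R' := (pvSel_perm f R').mem_iff.mp (by rw [hlen]; exact hb)
        rw [h2] at hbR'
        rw [Prod.Lex.lt_iff]
        rcases List.mem_append.mp hbR' with hbp | hbs
        · exact Or.inl (by have := h3 b hbp; simp; omega)
        · rcases lt_or_eq_of_le (h4 b hbs) with hlt | heq
          · exact Or.inl (by simp; omega)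
          · refine Or.inr ⟨by simp [heq], ?_⟩
            have : ∀ x ∈ suf, r < x := by
              have := hR.sublist (l₁ := r :: suf) (by rw [h1]; exact (List.sublist_append_right pre _)) 
              exact fun x hx => List.rel_of_pairwise_cons this hx
            exact this b hbs
      · exact ih R' hR' hlen

theorem pvSorted_eq_sel (f : Int → Int) (R : List Int) (hR : R.Pairwise (· < ·)) :
    PySem.List.sorted R (fun i => toLex (-(f i), i)) false = pvSel f R.length R :=
  PySem.List.sorted_eq_of_perm_of_pairwise_lt _ _ _ (pvSel_perm f R) (pvSel_pairwise f R hR)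

theorem pvEraseIdx_append {α : Type} (a b : List α) (x : α) :
    (a ++ x :: b).eraseIdx a.length = a ++ b := by
  induction a with
  | nil => simp
  | cons y ys ih => simp [ih]

theorem pvSortedDesc_cons (f : Int → Int) (R : List Int) (r : Int) (R' : List Int)
    (h : pvFirstMax f R = some (r, R')) :
    PySem.List.sorted (R.map f) (fun x => x) true
      = f r :: PySem.List.sorted (R'.map f) (fun x => x) true := by
  obtain ⟨pre, suf, h1, h2, h3, h4⟩ := pvFirstMax_spec f R r R' h
  refine List.Perm.eq_of_pairwise (le := fun a b => b ≤ a)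
    (fun a b _ _ hab hba => le_antisymm hba hab) ?_ ?_ ?_
  · exact PySem.List.sorted_pairwise_rev _ _
  · rw [List.pairwise_cons]
    refine ⟨?_, PySem.List.sorted_pairwise_rev _ _⟩
    intro b hb
    rw [PySem.List.mem_sorted] at hb
    rw [h2, List.map_append, List.mem_append] at hb
    rcases hb with hb | hb
    · obtain ⟨x, hx, rfl⟩ := List.mem_map.mp hb; exact le_of_lt (h3 x hx)
    · obtain ⟨x, hx, rfl⟩ := List.mem_map.mp hb; exact h4 x hx
  · refine (PySem.List.sorted_perm _ _ _).trans ?_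
    have : R.map f = pre.map f ++ f r :: suf.map f := by simp [h1]
    rw [this]
    refine List.perm_middle.trans ?_
    refine List.Perm.cons _ ?_
    have : R'.map f = pre.map f ++ suf.map f := by simp [h2]
    rw [this]
    exact (PySem.List.sorted_perm _ _ _).symm


theorem pvLoopA_eq (shapes : List (List (List Int))) (old : List Int) (f : Int → Int)
    (hnd : shapes.Nodup) :
    ∀ (k : Nat) (R : List Int) (shortAcc : List (List (List Int))) (idxAcc : List Int),
      shortAcc.length + k = 5 → k ≤ R.length →
      (∀ r ∈ R, 0 ≤ r ∧ r < (shapes.length : Int)) →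
      pvLoopA shapes old k (PySem.List.sorted (R.map f) (fun x => x) true) (R.map f)
        (R.map (fun r => PySem.List.pyGetD shapes r [])) shortAcc idxAcc
      = (shortAcc ++ (pvSel f k R).map (fun r => PySem.List.pyGetD shapes r []),
         idxAcc ++ (pvSel f k R).map (fun r => PySem.List.pyGetD old r 0)) := by
  intro k
  induction k with
  | zero => intro R sA iA _ _ _; simp [pvLoopA, pvSel]
  | succ k ih =>
    intro R sA iA hlen hk hmem
    cases hm : pvFirstMax f R with
    | none =>
      have : R = [] := (pvFirstMax_none f R).mp hm
      subst this; simp at hk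
    | some p =>
      obtain ⟨r, R'⟩ := p
      obtain ⟨pre, suf, h1, h2, h3, h4⟩ := pvFirstMax_spec f R r R' hm
      have hrR : r ∈ R := by rw [h1]; exact List.mem_append_right _ (List.mem_cons_self)
      obtain ⟨hr0, hrlt⟩ := hmem r hrR
      have hRlen : R.length = R'.length + 1 := by rw [h1, h2]; simp; omega
      have hidx : PySem.List.index? (R.map f) (f r) = some pre.length := by
        rw [PySem.List.index?_eq_some_iff]
        refine ⟨pre.map f, suf.map f, by simp [h1], by simp, ?_⟩
        intro hc
        obtain ⟨x, hx, hfx⟩ := List.mem_map.mp hc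
        exact absurd hfx (ne_of_lt (h3 x hx))
      have herase : (R.map f).eraseIdx pre.length = R'.map f := by
        rw [show R.map f = pre.map f ++ f r :: suf.map f by simp [h1],
            show pre.length = (pre.map f).length by simp, pvEraseIdx_append, h2]
        simp
      have hRg : R.map (fun r => PySem.List.pyGetD shapes r [])
          = pre.map (fun r => PySem.List.pyGetD shapes r []) ++
            PySem.List.pyGetD shapes r [] :: suf.map (fun r => PySem.List.pyGetD shapes r []) := by
        simp [h1]
      have hpop : PySem.List.pop? (R.map (fun r => PySem.List.pyGetD shapes r [])) (pre.length : Int)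
          = some (PySem.List.pyGetD shapes r [],
                  R'.map (fun r => PySem.List.pyGetD shapes r [])) := by
        rw [hRg]
        rw [show (pre.length : Int) = ((pre.map (fun r => PySem.List.pyGetD shapes r [])).length : Int) by simp]
        rw [PySem.List.pop?_natCast _ _ (by simp)]
        rw [List.getElem_of_append rfl rfl, pvEraseIdx_append, h2]
        simp
      have hidx2 : PySem.List.index? shapes (PySem.List.pyGetD shapes r []) = some r.toNat := by
        have hlt' : r.toNat < shapes.length := by omega
        rw [PySem.List.pyGetD_eq_getElem shapes [] hr0 hrlt]
        rw [PySem.List.index?_eq_idxOf?]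
        rw [List.idxOf?_eq_some_iff]
        exact ⟨hlt', rfl, fun j hj => by
          intro hc
          exact absurd ((List.Nodup.getElem_inj_iff hnd).mp hc) (by omega)⟩
      have hcast : ((r.toNat : Nat) : Int) = r := Int.toNat_of_nonneg hr0
      rw [pvSortedDesc_cons f R r R' hm]
      simp only [pvLoopA, if_neg (show ¬ sA.length = 5 by omega), hidx, herase, hpop, hidx2, hcast]
      rw [ih R' (sA ++ [PySem.List.pyGetD shapes r []]) (iA ++ [PySem.List.pyGetD old r 0])
        (by simp; omega) (by omega)
        (by intro x hx
            refine hmem x ?_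
            rw [h1]; rw [h2] at hx
            rcases List.mem_append.mp hx with h | h
            · exact List.mem_append_left _ h
            · exact List.mem_append_right _ (List.mem_cons_of_mem _ h))]
      simp [pvSel, hm]


theorem pvTakeRange (old : List Int) (n : Nat) (h : n ≤ old.length) :
    (PySem.List.pyRange 0 (n : Int) 1).foldl (fun acc i => acc ++ [PySem.List.pyGetD old i 0]) []
      = old.take n := by
  rw [PySem.List.foldl_append_singleton_eq_map]
  induction n with
  | zero => simp [PySem.List.pyRange_one_eq_nil]
  | succ m ih =>
    have hsplit := PySem.List.pyRange_one_succ_right (a := (0:Int)) (b := (m:Int)) (by positivity)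
    have hcast : ((m:Int) + 1) = ((m+1 : Nat) : Int) := by push_cast; ring
    rw [← hcast, hsplit, List.map_append]
    rw [List.nil_append] at ih ⊢
    rw [ih (by omega)]
    have hg : old[(m:Nat)]?.getD 0 = old[(m:Nat)]'(by omega) := by
      rw [List.getElem?_eq_getElem (show m < old.length by omega)]; rfl
    simp only [List.map_cons, List.map_nil, PySem.List.pyGetD_natCast, List.getD, hg]
    rw [List.take_add_one, List.getElem?_eq_getElem (show m < old.length by omega)]
    rfl

-- ===== VERDICT (by name: the statement is the Claim_ definition above) =====
theorem sort_shape_spec : Claim_equal_sort_shape := by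
  intro shapes old _ hpre
  obtain ⟨hlen, hcases⟩ := hpre
  unfold Spec_sort_shape
  simp only [sort_shape, sort_shape_alt, PySem.List.len_eq]
  by_cases h5 : (shapes.length : Int) ≤ 5
  · rw [if_pos h5, if_pos h5, pvTakeRange old shapes.length (by omega),
        PySem.List.slice_to_natCast]
  · rw [if_neg h5, if_neg h5]
    have hnd : shapes.Nodup := by
      rcases hcases with h | h
      · exact absurd (by exact_mod_cast h) h5
      · exact h
    have hsp : shapes.map (fun s => (s.map pvRowMargin).sum) = shapes.map pvCheckSpace := by
      exact List.map_congr_left (fun s _ => (pvCheckSpace_eq s).symm)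
    rw [hsp]
    rw [PySem.List.foldl_append_singleton_eq_map pvCheckSpace shapes []]
    rw [List.nil_append]
    set spaces0 := shapes.map pvCheckSpace with hspaces0
    set f : Int → Int := fun r => PySem.List.pyGetD spaces0 r 0 with hf
    set R : List Int := PySem.List.pyRange 0 (shapes.length : Int) 1 with hR
    have hlenR : R.length = shapes.length := by
      rw [hR, PySem.List.length_pyRange_one]; omega
    have hmemR : ∀ r ∈ R, 0 ≤ r ∧ r < (shapes.length : Int) := by
      intro r hr
      rw [hR, PySem.List.mem_pyRange_one] at hr
      exact hr
    have hRf : R.map f = spaces0 := by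
      rw [hR, hf, hspaces0]
      have h := PySem.List.map_pyGetD_pyRange_zero' (xs := shapes.map pvCheckSpace) (d := (0:Int))
      rwa [List.length_map] at h
    have hRg : R.map (fun r => PySem.List.pyGetD shapes r []) = shapes :=
      PySem.List.map_pyGetD_pyRange_zero' (xs := shapes) (d := [])
    -- A side: the loop
    have hA := pvLoopA_eq shapes old f hnd 5 R [] [] (by simp) (by omega) hmemR
    rw [hRf, hRg] at hA
    rw [hA]
    -- B side
    have hkey : (fun i => toLex (-(PySem.List.pyGetD spaces0 i 0), i))
        = (fun i : Int => (toLex (-(f i), i) : Lex (Int × Int))) := by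
      funext i; rw [hf]
    rw [hkey, pvSorted_eq_sel f R (by rw [hR]; exact PySem.List.pairwise_lt_pyRange_one 0 _),
        pvSel_take f 5 R.length R (by omega)]
    simp
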